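-- pv_equiv track=rewrite | github.com/xuanxu/bioinformatics-stronghold | 012-grph/grph.py | o3_adjacency_list
-- ===== SOURCE A (Python) =====
-- def o3_adjacency_list(dna_strings):
--   o3 = []
--   for name in dna_strings.keys():
--     suffix = dna_strings[name][-3:]
--     dnas = list(dna_strings.keys())
--     dnas.remove(name)
--
--     for other_dna in dnas:
--       if dna_strings[other_dna][0:3] == suffix:
--         o3.append([name, other_dna])
--
--   return o3
-- ===== SOURCE B (Python) =====
-- def o3_adjacency_list(dna_strings):
--   index = {}
--   for name in dna_strings:
--     index.setdefault(dna_strings[name][0:3], []).append(name)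
--   o3 = []
--   for name in dna_strings:
--     for other_dna in index.get(dna_strings[name][-3:], []):
--       if other_dna != name:
--         o3.append([name, other_dna])
--   return o3
-- ===== Notes on version B (the rewrite author's own statement) =====
-- stated objective: faster
-- what changed: Replaces the quadratic all-pairs scan with a dict indexing names by their 3-char prefix, so each name's suffix is resolved by one hash lookup instead of scanning every other name.
import Mathlib
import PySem

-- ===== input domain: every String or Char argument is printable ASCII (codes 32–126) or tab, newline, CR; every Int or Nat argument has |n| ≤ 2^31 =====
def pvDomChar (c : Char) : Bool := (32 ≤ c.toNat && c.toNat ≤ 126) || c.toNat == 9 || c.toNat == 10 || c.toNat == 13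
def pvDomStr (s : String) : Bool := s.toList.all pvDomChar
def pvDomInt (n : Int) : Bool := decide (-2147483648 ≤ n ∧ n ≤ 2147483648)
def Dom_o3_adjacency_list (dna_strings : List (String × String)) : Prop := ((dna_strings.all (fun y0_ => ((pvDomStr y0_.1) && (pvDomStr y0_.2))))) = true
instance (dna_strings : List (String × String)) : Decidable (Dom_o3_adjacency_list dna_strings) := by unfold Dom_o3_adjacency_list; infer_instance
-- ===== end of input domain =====

-- ===== PORT A =====
-- B indexes names by 3-char prefix in a dict, replacing A's inner scan over all names; objective: faster.
def o3_adjacency_list (dna_strings : List (String × String)) : List (List String) :=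
  let d := PySem.Dict.ofList dna_strings
  d.keys.foldl (fun o3 name =>
    let suffix := PySem.List.slice (d.getD name "").toList (some (-3)) none
    let dnas := (PySem.List.remove? d.keys name).getD []
    dnas.foldl (fun o3 other_dna =>
      if PySem.List.slice (d.getD other_dna "").toList none (some 3) == suffix
      then o3 ++ [[name, other_dna]] else o3) o3) []

-- ===== PORT B =====
def o3_adjacency_list_alt (dna_strings : List (String × String)) : List (List String) :=
  let d := PySem.Dict.ofList dna_strings
  let index := (d.keys.map (fun name =>
      (PySem.List.slice (d.getD name "").toList none (some 3), name))).foldl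
      (fun ix p => ix.modify p.1 [] (· ++ [p.2])) PySem.Dict.empty
  d.keys.foldl (fun o3 name =>
    (index.getD (PySem.List.slice (d.getD name "").toList (some (-3)) none) []).foldl
      (fun o3 other_dna => if other_dna != name then o3 ++ [[name, other_dna]] else o3) o3) []

-- ===== PRECONDITION & SPEC =====
def Spec_o3_adjacency_list (dna_strings : List (String × String)) (out : List (List String)) : Prop := out = o3_adjacency_list_alt dna_strings
instance (dna_strings : List (String × String)) (out : List (List String)) : Decidable (Spec_o3_adjacency_list dna_strings out) := by unfold Spec_o3_adjacency_list; infer_instance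

-- ===== CLAIM (what is proved, stated in full; the proofs are below) =====
def Claim_equal_o3_adjacency_list : Prop := ∀ (dna_strings : List (String × String)), Dom_o3_adjacency_list dna_strings → Spec_o3_adjacency_list dna_strings (o3_adjacency_list dna_strings)

-- ===== LEMMAS AND PROOFS =====

-- The prefix-index built by B lists, for any query, exactly the names whose 3-char prefix equals it, in key order.
theorem pv_index_getD (d : PySem.Dict String String) (suf : List Char) :
    ((d.keys.map (fun name =>
        (PySem.List.slice (d.getD name "").toList none (some 3), name))).foldl
        (fun ix p => ix.modify p.1 [] (· ++ [p.2])) PySem.Dict.empty).getD suf []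
      = d.keys.filter (fun k => PySem.List.slice (d.getD k "").toList none (some 3) == suf) := by
  rw [PySem.Dict.getD_foldl_modify_append, List.filter_map, List.map_map]
  simp [Function.comp_def]

-- Inner loops agree for each name in the (nodup) key list.
theorem pv_inner (d : PySem.Dict String String) (name : String) (hmem : name ∈ d.keys)
    (hnd : d.keys.Nodup) (acc : List (List String)) :
    ((PySem.List.remove? d.keys name).getD []).foldl (fun o3 other_dna =>
        if PySem.List.slice (d.getD other_dna "").toList none (some 3)
            == PySem.List.slice (d.getD name "").toList (some (-3)) none
        then o3 ++ [[name, other_dna]] else o3) acc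
    = (d.keys.filter (fun k => PySem.List.slice (d.getD k "").toList none (some 3)
          == PySem.List.slice (d.getD name "").toList (some (-3)) none)).foldl
        (fun o3 other_dna => if other_dna != name then o3 ++ [[name, other_dna]] else o3) acc := by
  rw [PySem.List.remove?_eq_some_erase _ _ hmem, Option.getD_some,
      PySem.List.foldl_append_if, PySem.List.foldl_append_if,
      hnd.erase_eq_filter, List.filter_filter, List.filter_filter]
  congr 2
  exact List.filter_congr (fun a _ => Bool.and_comm _ _)

-- ===== VERDICT (by name: the statement is the Claim_ definition above) =====
theorem o3_adjacency_list_spec : Claim_equal_o3_adjacency_list := by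
  intro dna_strings _
  unfold Spec_o3_adjacency_list o3_adjacency_list o3_adjacency_list_alt
  apply PySem.List.foldl_congr_mem
  intro acc name hmem
  rw [pv_index_getD]
  exact pv_inner _ name hmem (PySem.Dict.nodup_keys_ofList _) acc
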